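-- pv_equiv track=rewrite | github.com/ByungsukYoun/SeatSense | seat_detection.py | apply_hold_logic
-- ===== SOURCE A (Python) =====
-- SEAT_HOLD_FRAMES = {
--     8: 90   # ~9 seconds - laptop on seat 8 is occasionally missed by YOLO
--     # Add other seat IDs here if needed, e.g.  3: 30
-- }
--
-- DEFAULT_HOLD_FRAMES = 0  # All other seats: no hold (instant Available)
--
-- def apply_hold_logic(seat_status, hold_counters):
--     """
--     Apply per-seat hold frame logic to prevent flickering.
--     Only seats listed in SEAT_HOLD_FRAMES are affected.
--     All other seats switch to Available immediately.
--     """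
--     for seat_id in seat_status:
--         hold = SEAT_HOLD_FRAMES.get(seat_id, DEFAULT_HOLD_FRAMES)
--         if hold == 0:
--             continue  # No hold for this seat - leave status as-is
--
--         if seat_status[seat_id]['status'] == 'Occupied':
--             hold_counters[seat_id] = hold  # Reset counter on detection
--         else:
--             if hold_counters[seat_id] > 0:
--                 hold_counters[seat_id] -= 1
--                 seat_status[seat_id]['status'] = 'Occupied'  # Hold as Occupied
--
--     return seat_status, hold_counters
-- ===== SOURCE B (Python) =====
-- SEAT_HOLD_FRAMES = {
--     8: 90
-- }
--
-- DEFAULT_HOLD_FRAMES = 0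
--
--
-- def apply_hold_logic(seat_status, hold_counters):
--     # Pure rebuild: classify the configured seats once into 'held' (occupied,
--     # reset counter) and 'decr' (not occupied but counter still running), then
--     # remap both dicts in single passes instead of mutating them seat by seat.
--     held = {}
--     decr = {}
--     for sid, hold in SEAT_HOLD_FRAMES.items():
--         if hold == 0 or sid not in seat_status:
--             continue
--         if seat_status[sid]['status'] == 'Occupied':
--             held[sid] = hold
--         elif hold_counters[sid] > 0:
--             decr[sid] = hold
--     new_status = {sid: (dict(info, status='Occupied') if sid in decr else info)
--                   for sid, info in seat_status.items()}
--     new_counters = {sid: (held[sid] if sid in held else c - 1 if sid in decr else c)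
--                     for sid, c in hold_counters.items()}
--     for sid, h in held.items():
--         if sid not in hold_counters:
--             new_counters[sid] = h
--     return new_status, new_counters
-- ===== Notes on version B (the rewrite author's own statement) =====
-- stated objective: alternative
-- what changed: B replaces A's in-place per-seat mutation loop by a classify-then-rebuild scheme: one pass over the SEAT_HOLD_FRAMES table splits held seats into 'reset' and 'decrement' sets, then both output dicts are rebuilt by pure comprehensions (plus an append pass for counters of newly held seats); return values are proved equal (A mutates its arguments in place, B does not). Pre_ excludes inputs where A raises KeyError (a held seat whose dict lacks 'status', or a non-occupied held seat missing from hold_counters) and association lists with duplicate keys, which do not represent a Python dict; …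
import Mathlib
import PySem

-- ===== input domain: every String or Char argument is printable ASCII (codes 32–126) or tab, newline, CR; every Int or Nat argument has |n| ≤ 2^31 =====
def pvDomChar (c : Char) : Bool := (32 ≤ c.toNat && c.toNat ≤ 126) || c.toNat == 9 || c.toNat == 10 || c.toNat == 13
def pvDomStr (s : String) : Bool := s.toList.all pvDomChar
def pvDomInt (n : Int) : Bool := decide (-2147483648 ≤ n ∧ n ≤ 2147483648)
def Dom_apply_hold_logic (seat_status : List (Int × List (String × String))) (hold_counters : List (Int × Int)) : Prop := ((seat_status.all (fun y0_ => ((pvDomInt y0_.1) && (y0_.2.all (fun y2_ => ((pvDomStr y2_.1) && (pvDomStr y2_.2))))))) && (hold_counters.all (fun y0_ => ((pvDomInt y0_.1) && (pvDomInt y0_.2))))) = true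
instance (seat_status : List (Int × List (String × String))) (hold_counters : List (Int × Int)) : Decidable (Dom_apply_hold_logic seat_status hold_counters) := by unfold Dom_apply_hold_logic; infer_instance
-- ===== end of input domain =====

-- B replaces A's in-place per-seat mutation loop by classify-then-rebuild (pure map passes);
-- return-value equivalence only is proved: Python A mutates its arguments in place, B does not.


-- ===== PORT A =====
-- SEAT_HOLD_FRAMES = {8: 90}; DEFAULT_HOLD_FRAMES = 0
def pvSeatHoldFrames : PySem.Dict Int Int := PySem.Dict.mk [(8, 90)]

-- one iteration of A's `for seat_id in seat_status` loop body (state = (seat_status, hold_counters));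
-- on the KeyError paths (no 'status' key / seat_id missing from hold_counters) Python raises: those
-- inputs are excluded by Pre_, the port's getD default is never reached inside Pre_.
def pvStepA (st : (List (Int × List (String × String))) × (List (Int × Int))) (sid : Int) :
    (List (Int × List (String × String))) × (List (Int × Int)) :=
  let hold := pvSeatHoldFrames.getD sid 0
  if hold == 0 then st
  else
    let d := (PySem.Dict.mk st.1).getD sid []
    if (PySem.Dict.mk d).getD "status" "" == "Occupied" then
      (st.1, ((PySem.Dict.mk st.2).insert sid hold).items)
    else
      let c := (PySem.Dict.mk st.2).getD sid 0
      if c > 0 then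
        (((PySem.Dict.mk st.1).insert sid ((PySem.Dict.mk d).insert "status" "Occupied").items).items,
         ((PySem.Dict.mk st.2).insert sid (c - 1)).items)
      else st

def apply_hold_logic (seat_status : List (Int × List (String × String))) (hold_counters : List (Int × Int)) : (List (Int × List (String × String))) × (List (Int × Int)) :=
  (seat_status.map Prod.fst).foldl pvStepA (seat_status, hold_counters)

-- ===== PORT B =====
-- B's classification pass over SEAT_HOLD_FRAMES.items(): builds (held, decr).
-- (the KeyError path `hold_counters[sid]` is ported as getD 0; Pre_ excludes those inputs)
def pvClassify (seat_status : List (Int × List (String × String))) (hold_counters : List (Int × Int)) :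
    PySem.Dict Int Int × PySem.Dict Int Int :=
  pvSeatHoldFrames.items.foldl (fun acc p =>
    if p.2 == 0 || !((PySem.Dict.mk seat_status).contains p.1) then acc
    else if (PySem.Dict.mk ((PySem.Dict.mk seat_status).getD p.1 [])).getD "status" "" == "Occupied" then
      (acc.1.insert p.1 p.2, acc.2)
    else if (PySem.Dict.mk hold_counters).getD p.1 0 > 0 then
      (acc.1, acc.2.insert p.1 p.2)
    else acc) (PySem.Dict.empty, PySem.Dict.empty)

def apply_hold_logic_alt (seat_status : List (Int × List (String × String))) (hold_counters : List (Int × Int)) : (List (Int × List (String × String))) × (List (Int × Int)) :=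
  let hd := pvClassify seat_status hold_counters
  let new_status := seat_status.map (fun p =>
    if hd.2.contains p.1 then (p.1, ((PySem.Dict.mk p.2).insert "status" "Occupied").items) else p)
  let new_counters := hold_counters.map (fun p =>
    (p.1, if hd.1.contains p.1 then hd.1.getD p.1 0 else if hd.2.contains p.1 then p.2 - 1 else p.2))
  (new_status, new_counters ++ hd.1.items.filter (fun q => !((PySem.Dict.mk hold_counters).contains q.1)))

-- ===== PRECONDITION & SPEC =====
-- Pre_ excludes (a) association lists with duplicate keys, which cannot arise from a Python dict,
-- and (b) the inputs on which A raises KeyError (a held seat whose status dict has no 'status'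
-- key, or a held non-'Occupied' seat absent from hold_counters); B raises there too.
def Pre_apply_hold_logic (seat_status : List (Int × List (String × String))) (hold_counters : List (Int × Int)) : Prop :=
  (seat_status.map Prod.fst).Nodup ∧ (hold_counters.map Prod.fst).Nodup ∧
  (seat_status.all (fun p =>
    p.1 != 8 ||
      ((PySem.Dict.mk p.2).contains "status" &&
        ((PySem.Dict.mk p.2).getD "status" "" == "Occupied" ||
          (PySem.Dict.mk hold_counters).contains 8)))) = true
instance (seat_status : List (Int × List (String × String))) (hold_counters : List (Int × Int)) : Decidable (Pre_apply_hold_logic seat_status hold_counters) := by unfold Pre_apply_hold_logic; infer_instance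

def pvWitness_apply_hold_logic : (List (Int × List (String × String))) × (List (Int × Int)) :=
  ([(8, [("status", "Available")]), (3, [("status", "Occupied")])], [(8, 2)])

def Spec_apply_hold_logic (seat_status : List (Int × List (String × String))) (hold_counters : List (Int × Int)) (out : (List (Int × List (String × String))) × (List (Int × Int))) : Prop := out = apply_hold_logic_alt seat_status hold_counters
instance (seat_status : List (Int × List (String × String))) (hold_counters : List (Int × Int)) (out : (List (Int × List (String × String))) × (List (Int × Int))) : Decidable (Spec_apply_hold_logic seat_status hold_counters out) := by unfold Spec_apply_hold_logic; infer_instance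

-- ===== CLAIM (what is proved, stated in full; the proofs are below) =====
def Claim_equal_apply_hold_logic : Prop := ∀ (seat_status : List (Int × List (String × String))) (hold_counters : List (Int × Int)), Dom_apply_hold_logic seat_status hold_counters → Pre_apply_hold_logic seat_status hold_counters → Spec_apply_hold_logic seat_status hold_counters (apply_hold_logic seat_status hold_counters)

-- ===== LEMMAS AND PROOFS =====
theorem pvStepA_id_of_ne (st : (List (Int × List (String × String))) × (List (Int × Int)))
    (sid : Int) (h : sid ≠ 8) : pvStepA st sid = st := by
  unfold pvStepA pvSeatHoldFrames
  simp [PySem.Dict.getD, PySem.Dict.get?, Ne.symm h]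

theorem foldl_pvStepA_id (ks : List Int)
    (st : (List (Int × List (String × String))) × (List (Int × Int)))
    (h : 8 ∉ ks) : ks.foldl pvStepA st = st := by
  induction ks generalizing st with
  | nil => rfl
  | cons k r ih =>
    simp only [List.mem_cons, not_or] at h
    simp only [List.foldl_cons]
    rw [pvStepA_id_of_ne st k (fun e => h.1 e.symm)]
    exact ih st h.2

theorem foldl_pvStepA_char (ks : List Int)
    (st : (List (Int × List (String × String))) × (List (Int × Int)))
    (h : ks.count 8 ≤ 1) :
    ks.foldl pvStepA st = if 8 ∈ ks then pvStepA st 8 else st := by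
  induction ks generalizing st with
  | nil => simp
  | cons k r ih =>
    by_cases hk : k = 8
    · subst hk
      have hr : 8 ∉ r := by
        intro hm
        have : 1 ≤ r.count 8 := List.one_le_count_iff.mpr hm
        simp at h; omega
      simp [List.foldl_cons, foldl_pvStepA_id r _ hr]
    · simp only [List.foldl_cons, pvStepA_id_of_ne st k hk]
      rw [ih st (by simp [hk] at h ⊢; omega)]
      simp [List.mem_cons, Ne.symm hk]

theorem pvAlt_char (ss : List (Int × List (String × String))) (hc : List (Int × Int))
    (hnd : (ss.map Prod.fst).Nodup) (hndc : (hc.map Prod.fst).Nodup)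
    (hall : (ss.all (fun p =>
      p.1 != 8 ||
        ((PySem.Dict.mk p.2).contains "status" &&
          ((PySem.Dict.mk p.2).getD "status" "" == "Occupied" ||
            (PySem.Dict.mk hc).contains 8)))) = true) :
    (if 8 ∈ ss.map Prod.fst then pvStepA (ss, hc) 8 else (ss, hc)) = apply_hold_logic_alt ss hc := by
  have hkeys : (PySem.Dict.mk ss).contains 8 = decide (8 ∈ ss.map Prod.fst) := by
    rw [PySem.Dict.contains_eq_decide_mem_keys]; rfl
  have hkeysc : (PySem.Dict.mk hc).contains 8 = decide (8 ∈ hc.map Prod.fst) := by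
    rw [PySem.Dict.contains_eq_decide_mem_keys]; rfl
  by_cases hm : 8 ∈ ss.map Prod.fst
  · -- seat 8 present
    obtain ⟨p0, hp0, hp08⟩ := List.mem_map.mp hm
    have hgd : (PySem.Dict.mk ss).getD 8 [] = p0.2 := by
      have hmem : ((8 : Int), p0.2) ∈ (PySem.Dict.mk ss).items := by
        simpa [PySem.Dict.items, ← hp08] using hp0
      exact PySem.Dict.getD_of_mem_items _ hmem (by simpa [PySem.Dict.keys, PySem.Dict.items] using hnd) []
    have hclause := List.all_eq_true.mp hall p0 hp0
    simp only [hp08] at hclause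
    simp only [bne_self_eq_false, Bool.false_or, Bool.and_eq_true, Bool.or_eq_true] at hclause
    by_cases hocc : ((PySem.Dict.mk p0.2).getD "status" "" == "Occupied") = true
    · -- occupied: reset counter
      have hany : (ss.any fun p => p.1 == 8) = true := by
        rw [List.any_eq_true]; exact ⟨p0, hp0, by simp [hp08]⟩
      simp only [if_pos hm]
      unfold pvStepA apply_hold_logic_alt pvClassify pvSeatHoldFrames
      simp only [List.foldl_cons, List.foldl_nil, hgd]
      simp [hany, hocc, PySem.Dict.contains_empty, PySem.Dict.contains_insert,
        PySem.Dict.getD_insert, PySem.Dict.getD_empty, PySem.Dict.items_insert, hkeysc]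
      have hg90 : (({ items := [((8:Int), (90:Int))] } : PySem.Dict Int Int).getD 8 0) = 90 := by decide
      simp only [hg90, PySem.Dict.empty, List.filter_nil, List.nil_append]
      by_cases hmc : (hc.any fun p => p.1 == 8) = true
      · simp only [hmc, if_true, Bool.not_true, List.filter_cons, List.filter_nil]
        norm_num
        intro a b hab
        by_cases h8 : a = 8 <;> simp [h8]
      · simp only [Bool.not_eq_true] at hmc
        have hne : ∀ p ∈ hc, p.1 ≠ 8 := by
          rw [List.any_eq_false] at hmc
          intro p hp he
          have := hmc p hp
          simp [he] at this
        simp only [hmc, Bool.not_false, Bool.false_eq_true, if_false, List.filter_cons,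
          List.filter_nil]
        norm_num
        exact ((List.map_congr_left fun p hp => by simp [hne p hp]).trans (List.map_id hc)).symm
    · -- not occupied: decrement-or-leave
      have hany : (ss.any fun p => p.1 == 8) = true := by
        rw [List.any_eq_true]; exact ⟨p0, hp0, by simp [hp08]⟩
      have hcont8 : (({ items := hc } : PySem.Dict Int Int)).contains 8 = true :=
        hclause.2.resolve_left hocc
      have hgdp : ∀ p ∈ ss, p.1 = 8 → ({ items := ss } : PySem.Dict Int (List (String × String))).getD 8 [] = p.2 := by
        intro p hp h8
        have hmem : ((8 : Int), p.2) ∈ ({ items := ss } : PySem.Dict Int (List (String × String))).items := by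
          simpa [PySem.Dict.items, ← h8] using hp
        exact PySem.Dict.getD_of_mem_items _ hmem (by simpa [PySem.Dict.keys, PySem.Dict.items] using hnd) []
      have hgdc : ∀ p ∈ hc, p.1 = 8 → ({ items := hc } : PySem.Dict Int Int).getD 8 0 = p.2 := by
        intro p hp h8
        have hmem : ((8 : Int), p.2) ∈ ({ items := hc } : PySem.Dict Int Int).items := by
          simpa [PySem.Dict.items, ← h8] using hp
        exact PySem.Dict.getD_of_mem_items _ hmem (by simpa [PySem.Dict.keys, PySem.Dict.items] using hndc) 0
      have hocc' : ¬ (({ items := p0.2 } : PySem.Dict String String).getD "status" "" = "Occupied") := by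
        simpa using hocc
      have hg90 : (({ items := [((8:Int), (90:Int))] } : PySem.Dict Int Int).getD 8 0) = 90 := by decide
      by_cases hcpos : (0 : Int) < ({ items := hc } : PySem.Dict Int Int).getD 8 0
      · -- counter running: decrement and hold occupied
        simp only [if_pos hm]
        unfold pvStepA apply_hold_logic_alt pvClassify pvSeatHoldFrames
        simp only [List.foldl_cons, List.foldl_nil, hgd]
        simp [hany, hocc', hcpos, hg90, PySem.Dict.contains_insert,
          PySem.Dict.items_insert, PySem.Dict.empty]
        constructor
        · intro a b hab
          by_cases h8 : a = 8
          · have hb : p0.2 = b := by rw [← hgd]; exact hgdp (a, b) hab h8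
            subst hb
            simp [h8]
          · simp [h8]
        · have hmc : (hc.any fun p => p.1 == 8) = true := by simpa using hcont8
          simp only [hmc, if_true]
          refine List.map_congr_left fun p hp => ?_
          by_cases h8 : p.1 = 8
          · have hv := hgdc p hp h8
            simp [h8, hv]
          · simp [h8]
      · -- counter exhausted: no change
        simp only [if_pos hm]
        unfold pvStepA apply_hold_logic_alt pvClassify pvSeatHoldFrames
        simp only [List.foldl_cons, List.foldl_nil, hgd]
        simp [hany, hocc', hcpos, hg90, PySem.Dict.empty]
  · -- seat 8 absent: both sides are the identity
    have hany : (ss.any fun p => p.1 == 8) = false := by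
      rw [List.any_eq_false]
      intro p hp
      simp only [beq_iff_eq]
      exact fun e => hm (List.mem_map.mpr ⟨p, hp, e⟩)
    simp only [if_neg hm]
    unfold apply_hold_logic_alt pvClassify pvSeatHoldFrames
    simp [hany, PySem.Dict.empty]

-- ===== VERDICT (by name: the statement is the Claim_ definition above) =====
theorem apply_hold_logic_spec : Claim_equal_apply_hold_logic := by
  intro ss hc _ hpre
  obtain ⟨hnd, hndc, hall⟩ := hpre
  show apply_hold_logic ss hc = apply_hold_logic_alt ss hc
  unfold apply_hold_logic
  rw [foldl_pvStepA_char _ _ (List.nodup_iff_count_le_one.mp hnd 8)]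
  exact pvAlt_char ss hc hnd hndc hall
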